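-- pv_equiv track=rewrite | github.com/CDBiddulph/scaffold-learning | experiments/gpqa_sonnet_20250729_154925/scaffolds/0/scaffold.py | extract_question_content
-- ===== SOURCE A (Python) =====
-- def extract_question_content(input_string: str) -> str:
--     """Extract the actual question content from input, removing metadata"""
--     lines = input_string.strip().split('\n')
--
--     # Find where metadata ends - look for closing tag
--     question_start = 0
--     for i, line in enumerate(lines):
--         if '</question-metadata>' in line:
--             question_start = i + 1
--             break
--
--     if question_start == 0:
--         # No metadata found, assume entire input is the question
--         return input_string.strip()
--     else:
--         return '\n'.join(lines[question_start:]).strip()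
-- ===== SOURCE B (Python) =====
-- def extract_question_content(input_string: str) -> str:
--     """Extract the actual question content from input, removing metadata"""
--     s = input_string.strip()
--     idx = s.find('</question-metadata>')
--     if idx == -1:
--         return s
--     pos = s.find('\n', idx)
--     if pos == -1:
--         return ''
--     return s[pos+1:].strip()
-- ===== Notes on version B (the rewrite author's own statement) =====
-- stated objective: idiomatic
-- what changed: B drops the split-into-lines pass entirely: it searches the raw stripped string for the closing tag with str.find, then for the newline ending that line, and slices the remainder, instead of splitting into a list of lines, scanning them with an indexed loop, and re-joining a sublist.
import Mathlib
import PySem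

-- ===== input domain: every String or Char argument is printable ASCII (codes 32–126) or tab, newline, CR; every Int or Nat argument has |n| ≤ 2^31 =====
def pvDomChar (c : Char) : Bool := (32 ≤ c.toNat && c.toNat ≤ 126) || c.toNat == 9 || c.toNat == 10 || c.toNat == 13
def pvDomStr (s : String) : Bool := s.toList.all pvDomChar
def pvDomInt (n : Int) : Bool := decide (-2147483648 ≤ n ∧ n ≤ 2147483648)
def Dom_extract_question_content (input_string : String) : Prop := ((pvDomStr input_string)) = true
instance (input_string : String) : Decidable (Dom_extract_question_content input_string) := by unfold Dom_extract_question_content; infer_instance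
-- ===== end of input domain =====

-- B replaces A's split-into-lines / indexed scan / re-join by direct substring search on the raw stripped string (same O(n) cost, no speed claim).

-- ===== PORT A =====
-- the 'for i, line in enumerate(lines): if tag in line: question_start = i+1; break' loop
def extract_question_content.loop : List String → Nat → Nat
  | [], _ => 0
  | line :: rest, i =>
      if PySem.Str.isIn "</question-metadata>" line then i + 1
      else extract_question_content.loop rest (i + 1)

def extract_question_content (input_string : String) : String :=
  let lines := (PySem.Str.split? (PySem.Str.strip input_string) "\n").getD []
  let question_start := extract_question_content.loop lines 0
  if question_start = 0 then PySem.Str.strip input_string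
  else PySem.Str.strip (PySem.Str.join "\n" (PySem.List.slice lines (some (question_start : Int)) none))

-- ===== PORT B =====
def extract_question_content_alt (input_string : String) : String :=
  let s := PySem.Str.strip input_string
  let idx := PySem.Str.find s "</question-metadata>"
  if idx = -1 then s
  else
    let pos := PySem.Str.findFrom s "\n" idx none
    if pos = -1 then ""
    else PySem.Str.strip (PySem.Str.slice s (some (pos + 1)) none)

-- ===== PRECONDITION & SPEC =====
def Spec_extract_question_content (input_string : String) (out : String) : Prop := out = extract_question_content_alt input_string
instance (input_string : String) (out : String) : Decidable (Spec_extract_question_content input_string out) := by unfold Spec_extract_question_content; infer_instance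

-- ===== CLAIM (what is proved, stated in full; the proofs are below) =====
def Claim_equal_extract_question_content : Prop := ∀ (input_string : String), Dom_extract_question_content input_string → Spec_extract_question_content input_string (extract_question_content input_string)

-- ===== LEMMAS AND PROOFS =====

def pvTag : List Char := "</question-metadata>".toList

-- everything after the newline that ends the line in which xs starts ([] if none)
def pvAfterNl (xs : List Char) : List Char :=
  match xs.dropWhile (· ≠ '\n') with
  | [] => []
  | _ :: r => r

-- B's shape: scan for the first occurrence of the tag, then cut after that line's newline
def pvG : List Char → Option (List Char)
  | [] => none
  | c :: t => if pvTag <+: (c :: t) then some (pvAfterNl (c :: t)) else pvG t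

-- A's shape: split into lines, find the first line containing the tag, re-join the rest
def pvF (cs : List Char) : Option (List Char) :=
  ((cs.splitOn '\n').findIdx? (fun l => PySem.Chars.isIn pvTag l)).map
    (fun j => ['\n'].intercalate ((cs.splitOn '\n').drop (j + 1)))

theorem pv_tag_ne_nil : pvTag ≠ [] := by decide
theorem pv_nl_not_mem_tag : '\n' ∉ pvTag := by decide

theorem pv_modifyHead_id {α : Type} (xs : List (List α)) :
    List.modifyHead (fun x => x) xs = xs := by
  cases xs <;> simp

theorem pv_splitOn_cons (c x : Char) (rest : List Char) :
    (x :: rest).splitOn c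
      = if x = c then [] :: rest.splitOn c else (rest.splitOn c).modifyHead (x :: ·) := by
  show List.splitOnP (· == c) (x :: rest) = _
  rw [List.splitOnP_cons]
  by_cases hx : x = c <;> simp [hx, List.splitOn]

theorem pv_dropWhile_nl (a b : List Char) (h : '\n' ∉ a) :
    (a ++ '\n' :: b).dropWhile (· ≠ '\n') = '\n' :: b := by
  induction a with
  | nil => simp
  | cons x a ih =>
    have hx : x ≠ '\n' := fun hx => h (hx ▸ List.mem_cons_self)
    rw [List.cons_append, List.dropWhile_cons]
    simp only [ne_eq, hx, not_false_eq_true, decide_true, if_true]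
    exact ih (fun hm => h (List.mem_cons_of_mem _ hm))

theorem pv_go_single (c : Char) (fuel : Nat) (l cur : List Char) (acc : List (List Char))
    (h : l.length < fuel) :
    PySem.Chars.splitOn.go [c] fuel l cur acc
      = acc.reverse ++ List.modifyHead (fun x => cur.reverse ++ x) (l.splitOn c) := by
  induction fuel generalizing l cur acc with
  | zero => omega
  | succ fuel ih =>
    cases l with
    | nil =>
      simp [PySem.Chars.splitOn.go]
    | cons x rest =>
      by_cases hx : x = c
      · subst hx
        rw [PySem.Chars.splitOn.go]
        have hpre : [x].isPrefixOf (x :: rest) = true := by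
          simp [List.isPrefixOf]
        simp only [hpre, if_true, List.length_cons, List.length_nil, List.drop_succ_cons,
          List.drop_zero]
        rw [ih rest [] (cur.reverse :: acc) (by simpa using Nat.lt_of_succ_lt_succ h)]
        simp [pv_splitOn_cons, pv_modifyHead_id]
      · rw [PySem.Chars.splitOn.go]
        have hpre : [c].isPrefixOf (x :: rest) = false := by
          simp [List.isPrefixOf]
          intro hcx; exact absurd hcx.symm hx
        simp only [hpre, Bool.false_eq_true, if_false]
        rw [ih rest (x :: cur) acc (by simpa using Nat.lt_of_succ_lt_succ h)]
        rw [pv_splitOn_cons]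
        simp only [hx, if_false]
        rw [List.modifyHead_modifyHead]
        cases rest.splitOn c <;> simp

theorem pv_splitOn_single (l : List Char) (c : Char) :
    PySem.Chars.splitOn l [c] = l.splitOn c := by
  unfold PySem.Chars.splitOn
  rw [pv_go_single c (l.length + 1) l [] [] (Nat.lt_succ_self _)]
  simp [pv_modifyHead_id]

theorem pv_splitOn_nosep (a : List Char) (h : '\n' ∉ a) : a.splitOn '\n' = [a] := by
  induction a with
  | nil => simp
  | cons x a ih =>
    have hx : x ≠ '\n' := fun hx => h (hx ▸ List.mem_cons_self)
    rw [pv_splitOn_cons]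
    simp only [hx, if_false]
    rw [ih (fun hm => h (List.mem_cons_of_mem _ hm))]
    simp

theorem pv_splitOn_append (a b : List Char) (h : '\n' ∉ a) :
    (a ++ '\n' :: b).splitOn '\n' = a :: b.splitOn '\n' := by
  induction a with
  | nil => simp [pv_splitOn_cons]
  | cons x a ih =>
    have hx : x ≠ '\n' := fun hx => h (hx ▸ List.mem_cons_self)
    rw [List.cons_append, pv_splitOn_cons]
    simp only [hx, if_false]
    rw [ih (fun hm => h (List.mem_cons_of_mem _ hm))]
    simp

theorem pv_loop_eq (lines : List String) (i : Nat) :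
    extract_question_content.loop lines i
      = match lines.findIdx? (fun l => PySem.Str.isIn "</question-metadata>" l) with
        | none => 0
        | some j => i + j + 1 := by
  induction lines generalizing i with
  | nil => simp [extract_question_content.loop]
  | cons l rest ih =>
    rw [extract_question_content.loop, List.findIdx?_cons]
    by_cases hl : PySem.Str.isIn "</question-metadata>" l = true
    · rw [if_pos hl, if_pos hl]
    · rw [if_neg hl, if_neg hl]
      rw [ih (i + 1)]
      cases rest.findIdx? (fun l => PySem.Str.isIn "</question-metadata>" l) with
      | none => simp
      | some j =>
        simp only [Option.map_some]
        show i + 1 + j + 1 = i + (j + 1) + 1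
        omega

theorem pv_prefix_split (a b : List Char) (h : pvTag <+: a ++ '\n' :: b) : pvTag <+: a := by
  obtain ⟨t, ht⟩ := h
  by_cases hlen : pvTag.length ≤ a.length
  · have h1 : (pvTag ++ t).take pvTag.length = pvTag := List.take_left
    rw [ht, List.take_append_of_le_length hlen] at h1
    exact h1 ▸ List.take_prefix _ _
  · exfalso
    apply pv_nl_not_mem_tag
    have hlt : a.length < pvTag.length := Nat.lt_of_not_le hlen
    have hlen2 : a.length < (pvTag ++ t).length := by
      simp only [List.length_append]; omega
    have h2 : (pvTag ++ t)[a.length]'hlen2 = pvTag[a.length]'hlt :=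
      List.getElem_append_left hlt
    have hlen3 : a.length < (a ++ '\n' :: b).length := by
      simp [List.length_append]
    have h3 : (a ++ '\n' :: b)[a.length]'hlen3 = '\n' := by
      rw [List.getElem_append_right (Nat.le_refl _)]
      simp
    have h4 : pvTag[a.length]'hlt = '\n' := by
      rw [← h2]
      have := h3
      simp only [← ht] at this
      exact this
    exact h4 ▸ List.getElem_mem hlt

theorem pv_afterNl_of_not_mem (xs : List Char) (h : '\n' ∉ xs) : pvAfterNl xs = [] := by
  unfold pvAfterNl
  have hd : xs.dropWhile (· ≠ '\n') = [] := by
    rw [List.dropWhile_eq_nil_iff]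
    intro x hx
    simp only [ne_eq, decide_eq_true_eq]
    exact fun hxn => h (hxn ▸ hx)
  rw [hd]

theorem pv_g_none_iff (cs : List Char) : pvG cs = none ↔ ¬ pvTag <:+: cs := by
  induction cs with
  | nil => simp [pvG, List.infix_nil, pv_tag_ne_nil]
  | cons c t ih =>
    rw [pvG]
    split_ifs with hp
    · simp [List.infix_cons_iff, hp]
    · rw [ih]
      simp [List.infix_cons_iff, hp]

theorem pv_g_nonl (cs : List Char) (h : '\n' ∉ cs) :
    pvG cs = if pvTag <:+: cs then some [] else none := by
  induction cs with
  | nil => simp [pvG, List.infix_nil, pv_tag_ne_nil]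
  | cons c t ih =>
    rw [pvG]
    split_ifs with hp hi hi
    · rw [pv_afterNl_of_not_mem _ h]
    · exact absurd hp.isInfix hi
    · have ht : pvTag <:+: t := (List.infix_cons_iff.mp hi).resolve_left hp
      rw [ih (fun hm => h (List.mem_cons_of_mem _ hm))]
      simp [ht]
    · have ht : ¬ pvTag <:+: t := fun ht => hi (List.infix_cons_iff.mpr (Or.inr ht))
      rw [ih (fun hm => h (List.mem_cons_of_mem _ hm))]
      simp [ht]

theorem pv_g_hit (a b : List Char) (h1 : '\n' ∉ a) (h2 : pvTag <:+: a) :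
    pvG (a ++ '\n' :: b) = some b := by
  induction a with
  | nil => exact absurd (List.infix_nil.mp h2) pv_tag_ne_nil
  | cons x a ih =>
    rw [List.cons_append, pvG]
    split_ifs with hp
    · congr 1
      have hx : x ≠ '\n' := fun hx => h1 (hx ▸ List.mem_cons_self)
      unfold pvAfterNl
      rw [List.dropWhile_cons]
      simp only [ne_eq, hx, not_false_eq_true, decide_true, if_true]
      rw [pv_dropWhile_nl a b (fun hm => h1 (List.mem_cons_of_mem _ hm))]
    · rcases List.infix_cons_iff.mp h2 with hpre | hinf
      · exact absurd (by
          have := hpre.trans (List.prefix_append (x :: a) ('\n' :: b))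
          rw [List.cons_append] at this
          exact this) hp
      · exact ih (fun hm => h1 (List.mem_cons_of_mem _ hm)) hinf

theorem pv_g_skip (a b : List Char) (h1 : '\n' ∉ a) (h2 : ¬ pvTag <:+: a) :
    pvG (a ++ '\n' :: b) = pvG b := by
  induction a with
  | nil =>
    rw [List.nil_append, pvG]
    split_ifs with hp
    · exfalso
      apply pv_nl_not_mem_tag
      cases htag : pvTag with
      | nil => exact absurd htag pv_tag_ne_nil
      | cons d ds =>
        rw [htag] at hp
        have := (List.cons_prefix_cons.mp hp).1
        rw [this]; exact List.mem_cons_self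
    · rfl
  | cons x a ih =>
    rw [List.cons_append, pvG]
    split_ifs with hp
    · exact absurd (pv_prefix_split _ _ (by rw [List.cons_append]; exact hp)).isInfix h2
    · exact ih (fun hm => h1 (List.mem_cons_of_mem _ hm))
        (fun hinf => h2 (List.infix_cons_iff.mpr (Or.inr hinf)))

theorem pv_decomp (cs : List Char) :
    '\n' ∉ cs ∨ ∃ a b, cs = a ++ '\n' :: b ∧ '\n' ∉ a := by
  induction cs with
  | nil => left; simp
  | cons c t ih =>
    by_cases hc : c = '\n'
    · right; exact ⟨[], t, by simp [hc], by simp⟩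
    · rcases ih with h | ⟨a, b, rfl, ha⟩
      · left
        intro hm
        rcases List.mem_cons.mp hm with h1 | h2
        · exact hc h1.symm
        · exact h h2
      · right
        refine ⟨c :: a, b, by simp, ?_⟩
        intro hm
        rcases List.mem_cons.mp hm with h1 | h2
        · exact hc h1.symm
        · exact ha h2

theorem pv_main_fg (cs : List Char) : pvF cs = pvG cs := by
  suffices H : ∀ n (cs : List Char), cs.length ≤ n → pvF cs = pvG cs from H cs.length cs le_rfl
  intro n
  induction n with
  | zero =>
    intro cs hlen
    have h0 : cs = [] := List.eq_nil_of_length_eq_zero (Nat.le_zero.mp hlen)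
    subst h0
    decide
  | succ n ihn =>
    intro cs hlen
    rcases pv_decomp cs with hnl | ⟨a, b, rfl, ha⟩
    · rw [pv_g_nonl cs hnl]
      unfold pvF
      rw [pv_splitOn_nosep cs hnl, List.findIdx?_cons]
      by_cases hin : PySem.Chars.isIn pvTag cs = true
      · rw [if_pos hin, if_pos ((PySem.Chars.isIn_iff_infix _ _).mp hin)]
        simp [List.intercalate]
      · rw [if_neg hin,
          if_neg (fun hi => hin ((PySem.Chars.isIn_iff_infix _ _).mpr hi))]
        simp
    · by_cases hin : PySem.Chars.isIn pvTag a = true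
      · have hinf : pvTag <:+: a := (PySem.Chars.isIn_iff_infix _ _).mp hin
        rw [pv_g_hit a b ha hinf]
        unfold pvF
        rw [pv_splitOn_append a b ha, List.findIdx?_cons, if_pos hin]
        simp only [Option.map_some]
        congr 1
        rw [List.drop_succ_cons, List.drop_zero]
        exact List.intercalate_splitOn b '\n'
      · have hninf : ¬ pvTag <:+: a := fun hi => hin ((PySem.Chars.isIn_iff_infix _ _).mpr hi)
        rw [pv_g_skip a b ha hninf]
        rw [← ihn b (by simp only [List.length_append, List.length_cons] at hlen; omega)]
        unfold pvF
        rw [pv_splitOn_append a b ha, List.findIdx?_cons, if_neg hin]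
        cases h : (b.splitOn '\n').findIdx? (fun l => PySem.Chars.isIn pvTag l) with
        | none => simp
        | some j =>
          simp only [Option.map_some, List.drop_succ_cons]

theorem pv_g_first (j : Nat) (cs : List Char) (hp : pvTag <+: cs.drop j)
    (hmin : ∀ i < j, ¬ pvTag <+: cs.drop i) :
    pvG cs = some (pvAfterNl (cs.drop j)) := by
  induction j generalizing cs with
  | zero =>
    rw [List.drop_zero] at hp ⊢
    cases cs with
    | nil => exact absurd (List.prefix_nil.mp hp) pv_tag_ne_nil
    | cons c t => rw [pvG, if_pos hp]
  | succ j ih =>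
    cases cs with
    | nil =>
      rw [List.drop_nil] at hp
      exact absurd (List.prefix_nil.mp hp) pv_tag_ne_nil
    | cons c t =>
      rw [pvG, if_neg (by simpa using hmin 0 (Nat.succ_pos j))]
      rw [List.drop_succ_cons] at hp ⊢
      exact ih t hp (fun i hi => by
        have := hmin (i + 1) (Nat.succ_lt_succ hi)
        rwa [List.drop_succ_cons] at this)

theorem pv_afterNl_first (r : Nat) (xs : List Char) (h : ['\n'] <+: xs.drop r)
    (hmin : ∀ i < r, ¬ ['\n'] <+: xs.drop i) :
    pvAfterNl xs = xs.drop (r + 1) := by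
  induction r generalizing xs with
  | zero =>
    rw [List.drop_zero] at h
    obtain ⟨u, hu⟩ := h
    rw [← hu]
    unfold pvAfterNl
    rw [List.singleton_append, List.dropWhile_cons]
    simp
  | succ r ih =>
    cases xs with
    | nil =>
      rw [List.drop_nil] at h
      exact absurd (List.prefix_nil.mp h) (by simp)
    | cons x t =>
      have hx : x ≠ '\n' := by
        intro hx
        exact hmin 0 (Nat.succ_pos r) (by rw [List.drop_zero, hx]; exact ⟨t, rfl⟩)
      have heq : pvAfterNl (x :: t) = pvAfterNl t := by
        unfold pvAfterNl
        rw [List.dropWhile_cons]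
        simp only [ne_eq, hx, not_false_eq_true, decide_true, if_true]
      rw [heq, List.drop_succ_cons] at *
      exact ih t h (fun i hi => by
        have := hmin (i + 1) (Nat.succ_lt_succ hi)
        rwa [List.drop_succ_cons] at this)

theorem pv_tag_def : "</question-metadata>".toList = pvTag := rfl

theorem pv_join_nl (parts : List (List Char)) :
    PySem.Chars.join "\n".toList parts = List.intercalate ['\n'] parts := rfl

theorem pv_A_char (input_string : String) :
    extract_question_content input_string
      = match pvF (PySem.Chars.strip input_string.toList) with
        | none => PySem.Str.strip input_string
        | some r => String.ofList (PySem.Chars.strip r) := by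
  unfold extract_question_content
  have hsplit : PySem.Str.split? (PySem.Str.strip input_string) "\n"
      = some (((PySem.Chars.strip input_string.toList).splitOn '\n').map String.ofList) := by
    rw [PySem.Str.split?.eq_1]
    have h1 : PySem.Chars.split? (PySem.Str.strip input_string).toList "\n".toList
        = some ((PySem.Chars.strip input_string.toList).splitOn '\n') := by
      rw [PySem.Str.toList_strip]
      unfold PySem.Chars.split?
      rw [if_neg (by decide)]
      have hnl : "\n".toList = ['\n'] := rfl
      rw [hnl, pv_splitOn_single]
    rw [h1, Option.map_some]
  dsimp only
  rw [hsplit, Option.getD_some, pv_loop_eq, List.findIdx?_map]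
  have hpred : ((fun l => PySem.Str.isIn "</question-metadata>" l) ∘ String.ofList)
      = fun l => PySem.Chars.isIn pvTag l := by
    funext l
    simp [PySem.Str.isIn, pv_tag_def]
  rw [hpred]
  unfold pvF
  cases ho : ((PySem.Chars.strip input_string.toList).splitOn '\n').findIdx?
      (fun l => PySem.Chars.isIn pvTag l) with
  | none => simp
  | some j =>
    simp only [Option.map_some, Nat.zero_add]
    have hne : j + 1 ≠ 0 := by omega
    rw [if_neg hne]
    have hslice : PySem.List.slice
        (((PySem.Chars.strip input_string.toList).splitOn '\n').map String.ofList)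
        (some ((j + 1 : Nat) : Int)) none
        = (((PySem.Chars.strip input_string.toList).splitOn '\n').map String.ofList).drop
            (j + 1) := by
      rw [PySem.List.slice_from _ (by positivity), Int.toNat_natCast]
    have hlist : (PySem.Str.join "\n"
          ((((PySem.Chars.strip input_string.toList).splitOn '\n').map String.ofList).drop
            (j + 1))).toList
        = List.intercalate ['\n'] (((PySem.Chars.strip input_string.toList).splitOn '\n').drop
            (j + 1)) := by
      rw [PySem.Str.toList_join, pv_join_nl]
      congr 1
      simp [List.map_drop, List.map_map, Function.comp_def]
    rw [hslice, PySem.Str.strip.eq_1, hlist]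

theorem pv_singleton_infix_iff (c : Char) (xs : List Char) : [c] <:+: xs ↔ c ∈ xs := by
  constructor
  · intro h
    exact List.singleton_sublist.mp h.sublist
  · intro h
    obtain ⟨s, t, rfl⟩ := List.append_of_mem h
    exact ⟨s, t, by simp⟩

theorem pv_B_char (input_string : String) :
    extract_question_content_alt input_string
      = match pvG (PySem.Chars.strip input_string.toList) with
        | none => PySem.Str.strip input_string
        | some r => String.ofList (PySem.Chars.strip r) := by
  unfold extract_question_content_alt
  dsimp only
  rw [PySem.Str.find_eq, PySem.Str.toList_strip, pv_tag_def]
  by_cases hidx : PySem.Chars.find (PySem.Chars.strip input_string.toList) pvTag = -1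
  · rw [if_pos hidx,
      (pv_g_none_iff _).mpr ((PySem.Chars.find_eq_neg_one_iff _ _).mp hidx)]
  · rw [if_neg hidx]
    have h0 : 0 ≤ PySem.Chars.find (PySem.Chars.strip input_string.toList) pvTag := by
      have := PySem.Chars.neg_one_le_find (PySem.Chars.strip input_string.toList) pvTag
      omega
    obtain ⟨hpre, hmin⟩ := PySem.Chars.find_spec (s := PySem.Chars.strip input_string.toList)
      (sub := pvTag) h0
    rw [pv_g_first ((PySem.Chars.find (PySem.Chars.strip input_string.toList) pvTag).toNat)
      (PySem.Chars.strip input_string.toList) hpre hmin]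
    have hfj : PySem.Chars.find (PySem.Chars.strip input_string.toList) pvTag
        = (((PySem.Chars.find (PySem.Chars.strip input_string.toList) pvTag).toNat : Nat) : Int) :=
      (Int.toNat_of_nonneg h0).symm
    have hjlen : (PySem.Chars.find (PySem.Chars.strip input_string.toList) pvTag).toNat
        ≤ (PySem.Chars.strip input_string.toList).length := by
      have := PySem.Chars.find_le_length (PySem.Chars.strip input_string.toList) pvTag
      omega
    rw [PySem.Str.findFrom_eq, PySem.Str.toList_strip]
    have hnl : "\n".toList = ['\n'] := rfl
    rw [hnl, hfj, PySem.Chars.findFrom_natCast _ _ _ hjlen]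
    simp only [Int.toNat_natCast]
    by_cases hr : PySem.Chars.find
        ((PySem.Chars.strip input_string.toList).drop
          ((PySem.Chars.find (PySem.Chars.strip input_string.toList) pvTag).toNat)) ['\n'] = -1
    · rw [if_pos hr, if_pos rfl]
      have hmem : '\n' ∉ (PySem.Chars.strip input_string.toList).drop
          ((PySem.Chars.find (PySem.Chars.strip input_string.toList) pvTag).toNat) :=
        fun hm => (PySem.Chars.find_eq_neg_one_iff _ _).mp hr
          ((pv_singleton_infix_iff _ _).mpr hm)
      rw [pv_afterNl_of_not_mem _ hmem]
      rfl
    · rw [if_neg hr]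
      have hr0 : 0 ≤ PySem.Chars.find
          ((PySem.Chars.strip input_string.toList).drop
            ((PySem.Chars.find (PySem.Chars.strip input_string.toList) pvTag).toNat)) ['\n'] := by
        have := PySem.Chars.neg_one_le_find
          ((PySem.Chars.strip input_string.toList).drop
            ((PySem.Chars.find (PySem.Chars.strip input_string.toList) pvTag).toNat)) ['\n']
        omega
      rw [if_neg (by omega)]
      obtain ⟨hpre2, hmin2⟩ := PySem.Chars.find_spec
        (s := (PySem.Chars.strip input_string.toList).drop
          ((PySem.Chars.find (PySem.Chars.strip input_string.toList) pvTag).toNat))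
        (sub := ['\n']) hr0
      rw [pv_afterNl_first _ _ hpre2 hmin2]
      rw [PySem.Str.strip.eq_1]
      have hsl : (PySem.Str.slice (PySem.Str.strip input_string)
            (some ((((PySem.Chars.find (PySem.Chars.strip input_string.toList) pvTag).toNat : Nat) : Int)
              + PySem.Chars.find
                  ((PySem.Chars.strip input_string.toList).drop
                    ((PySem.Chars.find (PySem.Chars.strip input_string.toList) pvTag).toNat)) ['\n']
              + 1)) none).toList
          = ((PySem.Chars.strip input_string.toList).drop
              ((PySem.Chars.find (PySem.Chars.strip input_string.toList) pvTag).toNat)).drop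
              ((PySem.Chars.find
                ((PySem.Chars.strip input_string.toList).drop
                  ((PySem.Chars.find (PySem.Chars.strip input_string.toList) pvTag).toNat))
                  ['\n']).toNat + 1) := by
        rw [PySem.Str.toList_slice, PySem.Chars.slice_eq_listSlice, PySem.Str.toList_strip]
        rw [PySem.List.slice_from _ (by omega), List.drop_drop]
        congr 1
        omega
      rw [hsl]

-- ===== VERDICT (by name: the statement is the Claim_ definition above) =====
theorem extract_question_content_spec : Claim_equal_extract_question_content := by
  intro input_string _
  unfold Spec_extract_question_content
  rw [pv_A_char, pv_B_char, pv_main_fg]
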